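-- pv_equiv track=rewrite | github.com/heng840/Dataset | prepare/step_3.py | align_relations
-- ===== SOURCE A (Python) =====
-- def align_relations(filtered_data):
--     all_relations = None
--
--     for data in filtered_data.values():
--         relations = set(item['relation'] for item in data)
--
--         if all_relations is None:
--             all_relations = relations
--         else:
--             all_relations = all_relations.intersection(relations)
--
--     aligned_data = {}
--
--     for file_path, data in filtered_data.items():
--         aligned_data[file_path] = [item for item in data if item['relation'] in all_relations]
--
--     return aligned_data
-- ===== SOURCE B (Python) =====
-- def align_relations(filtered_data):
--     total_files = len(filtered_data)
--     counts = {}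
--     for data in filtered_data.values():
--         for r in set(item['relation'] for item in data):
--             counts[r] = counts.get(r, 0) + 1
--     all_relations = {r for r, c in counts.items() if c == total_files}
--     return {file_path: [item for item in data if item['relation'] in all_relations]
--             for file_path, data in filtered_data.items()}
-- ===== Notes on version B (the rewrite author's own statement) =====
-- stated objective: alternative
-- what changed: Replaces the progressive set-intersection (with a None first-file special case) by a single count-and-threshold pass: a per-relation counter of how many files contain it, keeping relations whose count equals the number of files.
import Mathlib
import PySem

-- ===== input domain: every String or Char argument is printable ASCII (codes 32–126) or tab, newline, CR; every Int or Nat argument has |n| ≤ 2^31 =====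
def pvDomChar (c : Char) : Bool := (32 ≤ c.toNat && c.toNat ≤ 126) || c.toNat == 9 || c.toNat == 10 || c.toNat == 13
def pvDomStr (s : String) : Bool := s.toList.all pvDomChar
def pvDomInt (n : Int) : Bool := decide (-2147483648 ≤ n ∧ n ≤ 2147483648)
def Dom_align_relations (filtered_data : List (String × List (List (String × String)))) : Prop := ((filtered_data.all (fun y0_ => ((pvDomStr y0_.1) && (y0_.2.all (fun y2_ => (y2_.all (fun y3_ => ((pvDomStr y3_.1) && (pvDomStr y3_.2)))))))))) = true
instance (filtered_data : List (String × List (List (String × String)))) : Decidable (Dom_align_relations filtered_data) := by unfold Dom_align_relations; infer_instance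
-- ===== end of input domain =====

-- B changes the strategy: instead of A's progressive set-intersection with a None first-file
-- special case, B counts per relation how many files contain it and keeps relations whose
-- count equals the number of files; equivalence is about the return value only.

-- shared helper: item['relation'] (both Pythons do this lookup); Pre_ guarantees the key
-- is present, so the default is never returned
def pvRelOf (item : List (String × String)) : String :=
  (PySem.Dict.ofList item).getD "relation" ""

-- ===== PORT A =====

def align_relations (filtered_data : List (String × List (List (String × String)))) : List (String × List (List (String × String))) :=
  let ds := (PySem.Dict.ofList filtered_data).items
  let all_relations : Option (PySem.Set String) :=
    ds.foldl (fun acc p =>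
      let relations := PySem.Set.ofList (p.2.map pvRelOf)
      match acc with
      | none => some relations
      | some s => some (PySem.Set.inter s relations)) none
  ds.foldl (fun aligned p =>
    aligned ++ [(p.1, p.2.filter (fun it => PySem.Set.contains (all_relations.getD []) (pvRelOf it)))]) []

-- ===== PORT B =====

def align_relations_alt (filtered_data : List (String × List (List (String × String)))) : List (String × List (List (String × String))) :=
  let ds := (PySem.Dict.ofList filtered_data).items
  let total_files : Int := ds.length
  let counts : PySem.Dict String Int :=
    ds.foldl (fun d p =>
      (PySem.Set.ofList (p.2.map pvRelOf)).foldl (fun d r => d.modify r 0 (· + 1)) d)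
      PySem.Dict.empty
  let all_relations : PySem.Set String :=
    PySem.Set.ofList (((counts.items.filter (fun q => q.2 == total_files))).map (·.1))
  ds.map (fun p => (p.1, p.2.filter (fun it => PySem.Set.contains all_relations (pvRelOf it))))

-- ===== PRECONDITION & SPEC =====
-- Pre_ excludes exactly the inputs on which A raises KeyError: some item lacks the 'relation' key.
def Pre_align_relations (filtered_data : List (String × List (List (String × String)))) : Prop :=
  (((PySem.Dict.ofList filtered_data).items).all
    (fun p => p.2.all (fun item => (PySem.Dict.ofList item).contains "relation"))) = true
instance (filtered_data : List (String × List (List (String × String)))) : Decidable (Pre_align_relations filtered_data) := by unfold Pre_align_relations; infer_instance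

def pvWitness_align_relations : (List (String × List (List (String × String)))) :=
  [("f1", [[("relation", "r"), ("x", "1")]]), ("f2", [[("relation", "r")], [("relation", "s")]])]

def Spec_align_relations (filtered_data : List (String × List (List (String × String)))) (out : List (String × List (List (String × String)))) : Prop := out = align_relations_alt filtered_data
instance (filtered_data : List (String × List (List (String × String)))) (out : List (String × List (List (String × String)))) : Decidable (Spec_align_relations filtered_data out) := by unfold Spec_align_relations; infer_instance

-- ===== CLAIM (what is proved, stated in full; the proofs are below) =====
def Claim_equal_align_relations : Prop := ∀ (filtered_data : List (String × List (List (String × String)))), Dom_align_relations filtered_data → Pre_align_relations filtered_data → Spec_align_relations filtered_data (align_relations filtered_data)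

-- ===== LEMMAS AND PROOFS =====

-- A's intersection fold, characterised: membership in the accumulated intersection
theorem pv_interFold_some (sets : List (PySem.Set String)) (s0 : PySem.Set String) (r : String) :
    r ∈ (sets.foldl (fun acc s => match acc with
        | none => some s
        | some t => some (PySem.Set.inter t s)) (some s0)).getD []
      ↔ r ∈ s0 ∧ ∀ s ∈ sets, r ∈ s := by
  induction sets generalizing s0 with
  | nil => simp
  | cons s tl ih =>
    simp only [List.foldl_cons, ih, PySem.Set.mem_inter, List.forall_mem_cons]
    tauto

-- counting over a list of Nodup lists: the flattened count reaches the length iff r is in every list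
theorem pv_count_flatten_le (L : List (List String)) (r : String)
    (h : ∀ s ∈ L, s.Nodup) : (L.flatten).count r ≤ L.length := by
  induction L with
  | nil => simp
  | cons s tl ih =>
    simp only [List.flatten_cons, List.count_append, List.length_cons]
    have h1 : s.count r ≤ 1 := List.nodup_iff_count_le_one.mp (h s (by simp)) r
    have h2 := ih (fun x hx => h x (by simp [hx]))
    omega

theorem pv_count_flatten_eq_iff (L : List (List String)) (r : String)
    (h : ∀ s ∈ L, s.Nodup) : (L.flatten).count r = L.length ↔ ∀ s ∈ L, r ∈ s := by
  induction L with
  | nil => simp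
  | cons s tl ih =>
    simp only [List.flatten_cons, List.count_append, List.length_cons, List.mem_cons]
    have h1 : s.count r ≤ 1 := List.nodup_iff_count_le_one.mp (h s (by simp)) r
    have h2 := pv_count_flatten_le tl r (fun x hx => h x (by simp [hx]))
    have h3 := ih (fun x hx => h x (by simp [hx]))
    constructor
    · intro he
      have hs : s.count r = 1 := by omega
      have ht : (tl.flatten).count r = tl.length := by omega
      exact fun x hx => by
        rcases hx with rfl | hx
        · exact List.count_pos_iff.mp (by omega)
        · exact (h3.mp ht) x hx
    · intro hall
      have hs : s.count r = 1 :=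
        le_antisymm h1 (List.count_pos_iff.mpr (hall s (Or.inl rfl)))
      have ht := h3.mpr (fun x hx => hall x (Or.inr hx))
      omega

-- the core equivalence on the (common) items list of the outer dict
theorem pv_core (ds : List (String × List (List (String × String)))) :
    (ds.foldl (fun aligned p =>
      aligned ++ [(p.1, p.2.filter (fun it => PySem.Set.contains
        ((ds.foldl (fun acc p =>
          let relations := PySem.Set.ofList (p.2.map pvRelOf)
          match acc with
          | none => some relations
          | some s => some (PySem.Set.inter s relations)) none).getD [])
        (pvRelOf it)))]) [])
    = ds.map (fun p => (p.1, p.2.filter (fun it => PySem.Set.contains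
        (PySem.Set.ofList ((((ds.foldl (fun d p =>
            (PySem.Set.ofList (p.2.map pvRelOf)).foldl (fun d r => d.modify r 0 (· + 1)) d)
            PySem.Dict.empty).items.filter (fun q => q.2 == (ds.length : Int)))).map (·.1)))
        (pvRelOf it)))) := by
  rw [PySem.List.foldl_append_singleton_eq_map]
  -- name the per-file relation sets
  set sets : List (PySem.Set String) := ds.map (fun p => PySem.Set.ofList (p.2.map pvRelOf)) with hsets
  have hnodup : ∀ s ∈ sets, s.Nodup := by
    intro s hs
    rcases List.mem_map.mp hs with ⟨p, _, rfl⟩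
    exact PySem.Set.nodup_ofList _
  -- counts is the counter of the flattened per-file sets
  have hcounts : (ds.foldl (fun d p =>
      (PySem.Set.ofList (p.2.map pvRelOf)).foldl (fun d r => d.modify r 0 (· + 1)) d)
      PySem.Dict.empty) = PySem.Dict.counter (sets.flatten) := by
    rw [PySem.Dict.counter_eq_foldl, hsets, ← List.foldl_map, List.foldl_flatten]
  apply List.map_congr_left
  intro p hp
  refine congrArg _ (List.filter_congr ?_)
  intro it hit
  set r := pvRelOf it with hr
  -- r belongs to p's own relation set
  have hrp : r ∈ PySem.Set.ofList (p.2.map pvRelOf) := by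
    rw [PySem.Set.mem_ofList]
    exact List.mem_map.mpr ⟨it, hit, rfl⟩
  have hmemsets : PySem.Set.ofList (p.2.map pvRelOf) ∈ sets := List.mem_map.mpr ⟨p, hp, rfl⟩
  -- A side: membership in the fold
  have hA : PySem.Set.contains
      ((ds.foldl (fun acc p =>
          let relations := PySem.Set.ofList (p.2.map pvRelOf)
          match acc with
          | none => some relations
          | some s => some (PySem.Set.inter s relations)) none).getD []) r
      = decide (∀ s ∈ sets, r ∈ s) := by
    have hf : (ds.foldl (fun acc p =>
          let relations := PySem.Set.ofList (p.2.map pvRelOf)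
          match acc with
          | none => some relations
          | some s => some (PySem.Set.inter s relations)) none)
        = sets.foldl (fun acc s => match acc with
          | none => some s
          | some t => some (PySem.Set.inter t s)) none := by
      rw [hsets, List.foldl_map]
    rw [hf]
    rcases hsq : sets with _ | ⟨s0, tl⟩
    · exact absurd (hsq ▸ hmemsets) (List.not_mem_nil)
    · simp only [List.foldl_cons]
      by_cases hall : ∀ s ∈ s0 :: tl, r ∈ s
      · have hm := (pv_interFold_some tl s0 r).mpr
          ⟨hall s0 (by simp), fun s hs => hall s (by simp [hs])⟩
        rw [decide_eq_true hall, PySem.Set.contains_eq_listContains]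
        simpa using hm
      · rw [decide_eq_false hall, PySem.Set.contains_eq_listContains]
        by_cases hmem : r ∈ (tl.foldl (fun acc s => match acc with
            | none => some s
            | some t => some (PySem.Set.inter t s)) (some s0)).getD []
        · rcases (pv_interFold_some tl s0 r).mp hmem with ⟨h0, hallt⟩
          exact absurd (fun s hs => by rcases List.mem_cons.mp hs with rfl | hs
                                       · exact h0
                                       · exact hallt s hs) hall
        · simpa using hmem
  -- B side: membership in the thresholded counter
  have hB : PySem.Set.contains
      (PySem.Set.ofList ((((ds.foldl (fun d p =>
          (PySem.Set.ofList (p.2.map pvRelOf)).foldl (fun d r => d.modify r 0 (· + 1)) d)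
          PySem.Dict.empty).items.filter (fun q => q.2 == (ds.length : Int)))).map (·.1))) r
      = decide (∀ s ∈ sets, r ∈ s) := by
    rw [hcounts, PySem.Dict.items_counter]
    have hlen : sets.length = ds.length := by rw [hsets, List.length_map]
    by_cases hall : ∀ s ∈ sets, r ∈ s
    · have hcnt : (sets.flatten).count r = sets.length :=
        (pv_count_flatten_eq_iff sets r hnodup).mpr hall
      have hrflat : r ∈ sets.flatten := List.mem_flatten.mpr ⟨_, hmemsets, hrp⟩
      have hin : r ∈ (((PySem.Set.ofList sets.flatten).map
            (fun k => (k, ((sets.flatten).count k : Int)))).filter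
            (fun q => q.2 == (ds.length : Int))).map (·.1) := by
        refine List.mem_map.mpr ⟨(r, ((sets.flatten).count r : Int)), ?_, rfl⟩
        refine List.mem_filter.mpr ⟨List.mem_map.mpr ⟨r, ?_, rfl⟩, ?_⟩
        · exact (PySem.Set.mem_ofList _ _).mpr hrflat
        · simp [hcnt, hlen]
      rw [decide_eq_true hall, PySem.Set.contains_eq_listContains]
      simpa [PySem.Set.mem_ofList] using hin
    · have hne : (sets.flatten).count r ≠ sets.length :=
        fun h => hall ((pv_count_flatten_eq_iff sets r hnodup).mp h)
      have hnotin : r ∉ (((PySem.Set.ofList sets.flatten).map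
            (fun k => (k, ((sets.flatten).count k : Int)))).filter
            (fun q => q.2 == (ds.length : Int))).map (·.1) := by
        intro hrm
        rcases List.mem_map.mp hrm with ⟨⟨k, v⟩, hkv, hk⟩
        rcases List.mem_filter.mp hkv with ⟨hmm, heq⟩
        rcases List.mem_map.mp hmm with ⟨k', _, hpair⟩
        have hk1 : k' = k := congrArg Prod.fst hpair
        have hk2 : ((sets.flatten).count k' : Int) = v := congrArg Prod.snd hpair
        have hcr : ((sets.flatten).count r : Int) = (ds.length : Int) := by
          rw [← hk, ← hk1, hk2]; simpa using heq
        exact hne (by exact_mod_cast hlen ▸ hcr)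
      rw [decide_eq_false hall, PySem.Set.contains_eq_listContains]
      simpa [PySem.Set.mem_ofList] using hnotin
  rw [hA, hB]

-- ===== VERDICT (by name: the statement is the Claim_ definition above) =====
theorem align_relations_spec : Claim_equal_align_relations := by
  intro fd _ _
  unfold Spec_align_relations align_relations align_relations_alt
  exact pv_core ((PySem.Dict.ofList fd).items)
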